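-- pv_equiv track=rewrite | github.com/nlammers371/morphseq | results/mcolon/20260127_create_src_analyze_tutorial/04_cluster_projection.py | _label_key
-- ===== SOURCE A (Python) =====
-- def _label_key(label: str) -> str:
--     label_str = str(label).strip().lower()
--     cleaned = []
--     prev_underscore = False
--     for ch in label_str:
--         if ch.isalnum():
--             cleaned.append(ch)
--             prev_underscore = False
--         else:
--             if not prev_underscore:
--                 cleaned.append('_')
--                 prev_underscore = True
--     key = ''.join(cleaned).strip('_')
--     return key or "label"
-- ===== SOURCE B (Python) =====
-- def _label_key(label: str) -> str:
--     s = str(label).strip().lower()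
--     words = "".join(ch if ch.isalnum() else " " for ch in s).split()
--     return "_".join(words) or "label"
-- ===== Notes on version B (the rewrite author's own statement) =====
-- stated objective: simpler
-- what changed: Replaces the stateful character scan (a previous-separator flag plus a final edge strip) by blanking non-alphanumeric characters and letting str.split() tokenize and a join with underscores reassemble, which collapses separator runs and trims the ends automatically.
import Mathlib
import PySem

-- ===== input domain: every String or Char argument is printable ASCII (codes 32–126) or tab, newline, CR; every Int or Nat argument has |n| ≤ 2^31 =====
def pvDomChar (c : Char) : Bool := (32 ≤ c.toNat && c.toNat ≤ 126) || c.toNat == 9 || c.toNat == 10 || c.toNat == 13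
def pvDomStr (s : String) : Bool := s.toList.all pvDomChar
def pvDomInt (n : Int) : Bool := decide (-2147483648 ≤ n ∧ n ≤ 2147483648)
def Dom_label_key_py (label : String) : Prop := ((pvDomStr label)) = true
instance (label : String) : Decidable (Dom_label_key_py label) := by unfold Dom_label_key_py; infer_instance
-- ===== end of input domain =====

-- B replaces A's stateful scan (prev_underscore flag + final strip('_')) by blanking
-- non-alphanumeric chars and using split()/'_'.join(); objective: simpler.


-- ===== PORT A =====
def label_key_py (label : String) : String :=
  let labelStr := PySem.Str.lower (PySem.Str.strip label)
  let res := labelStr.toList.foldl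
    (fun (st : List Char × Bool) ch =>
      if PySem.Chars.isalnum ch then (st.1 ++ [ch], false)
      else if st.2 = false then (st.1 ++ ['_'], true) else st)
    ([], false)
  let key := PySem.Str.stripChars (String.ofList res.1) "_"
  if key == "" then "label" else key

-- ===== PORT B =====
def label_key_py_alt (label : String) : String :=
  let s := PySem.Str.lower (PySem.Str.strip label)
  let blanked := String.ofList (s.toList.map (fun ch => if PySem.Chars.isalnum ch then ch else ' '))
  let words := PySem.Str.split₀ blanked
  let key := PySem.Str.join "_" words
  if key == "" then "label" else key

-- ===== PRECONDITION & SPEC =====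
def Spec_label_key_py (label : String) (out : String) : Prop := out = label_key_py_alt label
instance (label : String) (out : String) : Decidable (Spec_label_key_py label out) := by unfold Spec_label_key_py; infer_instance

-- ===== CLAIM (what is proved, stated in full; the proofs are below) =====
def Claim_equal_label_key_py : Prop := ∀ (label : String), Dom_label_key_py label → Spec_label_key_py label (label_key_py label)

-- ===== LEMMAS AND PROOFS =====

-- the char that A's loop emits when ch is alnum / the underscore test used by strip('_')
def pvU (c : Char) : Bool := (['_'] : List Char).contains c

-- A's loop output as a plain recursion (prev = prev_underscore)
def pvAout : List Char → Bool → List Char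
  | [], _ => []
  | c :: rest, prev =>
    if PySem.Chars.isalnum c then c :: pvAout rest false
    else if prev then pvAout rest true else '_' :: pvAout rest true

-- B's tokenizer: split₀ over the blanked string, phrased on the original chars
def pvTgo : List Char → List Char → List (List Char)
  | [], cur => if cur.isEmpty then [] else [cur.reverse]
  | c :: rest, cur =>
    if PySem.Chars.isalnum c then pvTgo rest (c :: cur)
    else if cur.isEmpty then pvTgo rest [] else cur.reverse :: pvTgo rest []

-- right-strip of underscores
def pvRstrip (xs : List Char) : List Char := (List.dropWhile pvU xs.reverse).reverse

theorem pv_alnum_not_space (c : Char) (h : PySem.Chars.isalnum c = true) :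
    PySem.Chars.isspace c = false := by
  simp [PySem.Chars.isalnum, PySem.Chars.isalpha, PySem.Chars.isdigit, PySem.Chars.isupper,
    PySem.Chars.islower, Char.le_def, UInt32.le_iff_toNat_le] at h
  simp only [PySem.Chars.isspace]
  have hv : Char.toNat c = c.val.toNat := rfl
  simp only [hv, Bool.or_eq_false_iff, Bool.and_eq_false_iff, decide_eq_false_iff_not]
  omega

theorem pv_alnum_not_underscore (c : Char) (h : PySem.Chars.isalnum c = true) :
    pvU c = false := by
  rcases eq_or_ne c '_' with rfl | hne
  · simp [PySem.Chars.isalnum, PySem.Chars.isalpha, PySem.Chars.isdigit, PySem.Chars.isupper,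
      PySem.Chars.islower] at h
  · simp [pvU]
    exact hne

theorem pv_foldA (cs : List Char) : ∀ (acc : List Char) (prev : Bool),
    (cs.foldl
      (fun (st : List Char × Bool) ch =>
        if PySem.Chars.isalnum ch then (st.1 ++ [ch], false)
        else if st.2 = false then (st.1 ++ ['_'], true) else st)
      (acc, prev)).1 = acc ++ pvAout cs prev := by
  induction cs with
  | nil => intro acc prev; simp [pvAout]
  | cons c rest ih =>
    intro acc prev
    by_cases h : PySem.Chars.isalnum c = true
    · simp [List.foldl_cons, h, pvAout, ih]
    · cases prev <;> simp [List.foldl_cons, h, pvAout, ih]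

theorem pv_tgo_ne_nil (cs : List Char) : ∀ (cur : List Char), cur ≠ [] → pvTgo cs cur ≠ [] := by
  induction cs with
  | nil =>
    intro cur h
    simp [pvTgo, List.isEmpty_iff, h]
  | cons c rest ih =>
    intro cur h
    by_cases ha : PySem.Chars.isalnum c = true
    · simpa [pvTgo, ha] using ih (c :: cur) (by simp)
    · simp [pvTgo, ha, List.isEmpty_iff, h]

theorem pv_aout_true_shape (cs : List Char) :
    pvAout cs true = [] ∨ ∃ d rest', pvAout cs true = d :: rest' ∧ PySem.Chars.isalnum d = true := by
  induction cs with
  | nil => left; rfl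
  | cons c rest ih =>
    by_cases ha : PySem.Chars.isalnum c = true
    · right; exact ⟨c, pvAout rest false, by simp [pvAout, ha], ha⟩
    · simpa [pvAout, ha] using ih

theorem pv_drop_aout_true (cs : List Char) :
    List.dropWhile pvU (pvAout cs true) = pvAout cs true := by
  induction cs with
  | nil => rfl
  | cons c rest ih =>
    by_cases ha : PySem.Chars.isalnum c = true
    · simp [pvAout, ha, List.dropWhile_cons, pv_alnum_not_underscore c ha]
    · simpa [pvAout, ha] using ih

theorem pv_drop_aout_false (cs : List Char) :
    List.dropWhile pvU (pvAout cs false) = pvAout cs true := by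
  cases cs with
  | nil => rfl
  | cons c rest =>
    by_cases ha : PySem.Chars.isalnum c = true
    · simp [pvAout, ha, List.dropWhile_cons, pv_alnum_not_underscore c ha]
    · have hu : pvU '_' = true := by decide
      simp [pvAout, ha, List.dropWhile_cons, hu, pv_drop_aout_true rest]

theorem pv_rstrip_cons_of_not_u (c : Char) (xs : List Char) (h : pvU c = false) :
    pvRstrip (c :: xs) = c :: pvRstrip xs := by
  unfold pvRstrip
  rw [List.reverse_cons, List.dropWhile_append]
  by_cases he : (List.dropWhile pvU xs.reverse).isEmpty = true
  · simp [he, List.dropWhile_cons, h, List.isEmpty_iff.mp he]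
  · simp [he]

theorem pv_rstrip_underscore_cons (xs : List Char) :
    pvRstrip ('_' :: xs) = if pvRstrip xs = [] then [] else '_' :: pvRstrip xs := by
  unfold pvRstrip
  rw [List.reverse_cons, List.dropWhile_append]
  by_cases he : (List.dropWhile pvU xs.reverse).isEmpty = true
  · rw [if_pos he]
    rw [List.isEmpty_iff.mp he]
    simp [List.dropWhile_cons, show pvU '_' = true from by decide]
  · rw [if_neg he]
    have h2 : (List.dropWhile pvU xs.reverse).reverse ≠ [] := by
      simp [List.isEmpty_iff] at he
      simpa using he
    rw [if_neg h2]
    simp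

theorem pv_aout_true_nil_iff_tgo (cs : List Char) :
    (pvAout cs true = []) ↔ (pvTgo cs [] = []) := by
  induction cs with
  | nil => simp [pvAout, pvTgo]
  | cons c rest ih =>
    by_cases ha : PySem.Chars.isalnum c = true
    · simp [pvAout, pvTgo, ha]
      exact fun h => (pv_tgo_ne_nil rest [c] (by simp) h).elim
    · simpa [pvAout, pvTgo, ha] using ih

theorem pv_rstrip_aout_true_nil_iff (cs : List Char) :
    (pvRstrip (pvAout cs true) = []) ↔ (pvTgo cs [] = []) := by
  rw [← pv_aout_true_nil_iff_tgo]
  rcases pv_aout_true_shape cs with h | ⟨d, rest', h, hd⟩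
  · simp [h, pvRstrip]
  · rw [h]
    constructor
    · intro hs
      exfalso
      have : List.dropWhile pvU (d :: rest').reverse = [] := by
        have := congrArg List.reverse hs
        simpa [pvRstrip] using this
      have hall := List.dropWhile_eq_nil_iff.mp this
      have := hall d (by simp)
      rw [pv_alnum_not_underscore d hd] at this
      exact Bool.false_ne_true this
    · intro hs; exact absurd hs (by simp)

-- one join unfolding step
theorem pv_join_cons (x : List Char) (L : List (List Char)) :
    PySem.Chars.join ['_'] (x :: L) =
      x ++ (if L = [] then [] else '_' :: PySem.Chars.join ['_'] L) := by
  cases L with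
  | nil => simp [PySem.Chars.join, List.intercalate]
  | cons y t => simp [PySem.Chars.join, List.intercalate, List.intersperse]

-- the unified loop correspondence: B's pending word `cur` vs A's prev_underscore state
theorem pv_main (cs : List Char) : ∀ (cur : List Char),
    PySem.Chars.join ['_'] (pvTgo cs cur) = cur.reverse ++ pvRstrip (pvAout cs cur.isEmpty) := by
  induction cs with
  | nil =>
    intro cur
    cases cur with
    | nil => simp [pvTgo, pvAout, pvRstrip, PySem.Chars.join, List.intercalate]
    | cons d ds =>
      simp [pvTgo, pvAout, pvRstrip, PySem.Chars.join, List.intercalate]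
  | cons c rest ih =>
    intro cur
    by_cases ha : PySem.Chars.isalnum c = true
    · have h1 : pvTgo (c :: rest) cur = pvTgo rest (c :: cur) := by simp [pvTgo, ha]
      have h2 : pvAout (c :: rest) cur.isEmpty = c :: pvAout rest false := by
        cases cur <;> simp [pvAout, ha]
      rw [h1, ih (c :: cur), h2,
        pv_rstrip_cons_of_not_u c _ (pv_alnum_not_underscore c ha)]
      simp
    · cases cur with
      | nil =>
        have h1 : pvTgo (c :: rest) [] = pvTgo rest [] := by simp [pvTgo, ha]
        have h2 : pvAout (c :: rest) true = pvAout rest true := by simp [pvAout, ha]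
        simpa [h1, h2] using ih []
      | cons d ds =>
        have h1 : pvTgo (c :: rest) (d :: ds) = (d :: ds).reverse :: pvTgo rest [] := by
          simp [pvTgo, ha]
        have h2 : pvAout (c :: rest) (d :: ds).isEmpty = '_' :: pvAout rest true := by
          simp [pvAout, ha]
        rw [h1, h2, pv_join_cons, pv_rstrip_underscore_cons]
        have ihr := ih []
        simp only [List.reverse_nil, List.nil_append, List.isEmpty_nil] at ihr
        by_cases hz : pvTgo rest [] = []
        · rw [if_pos hz, if_pos ((pv_rstrip_aout_true_nil_iff rest).mpr hz)]
        · rw [if_neg hz, if_neg (fun h => hz ((pv_rstrip_aout_true_nil_iff rest).mp h)), ihr]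

-- split₀ of the blanked chars is exactly pvTgo on the original chars
theorem pv_split_blank (cs : List Char) : ∀ (cur : List Char) (acc : List (List Char)),
    PySem.Chars.split₀.go (cs.map (fun ch => if PySem.Chars.isalnum ch then ch else ' ')) cur acc
      = acc.reverse ++ pvTgo cs cur := by
  induction cs with
  | nil =>
    intro cur acc
    by_cases h : cur.isEmpty = true <;>
      simp [PySem.Chars.split₀.go, pvTgo, h]
  | cons c rest ih =>
    intro cur acc
    by_cases ha : PySem.Chars.isalnum c = true
    · simp [PySem.Chars.split₀.go, ha, pv_alnum_not_space c ha, pvTgo, ih]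
    · by_cases hc : cur.isEmpty = true
      · simp [PySem.Chars.split₀.go, ha, show PySem.Chars.isspace ' ' = true from by decide,
          hc, pvTgo, ih]
      · simp [PySem.Chars.split₀.go, ha, show PySem.Chars.isspace ' ' = true from by decide,
          hc, pvTgo, ih]

theorem pv_keys_eq (label : String) :
    PySem.Str.stripChars
        (String.ofList ((PySem.Str.lower (PySem.Str.strip label)).toList.foldl
          (fun (st : List Char × Bool) ch =>
            if PySem.Chars.isalnum ch then (st.1 ++ [ch], false)
            else if st.2 = false then (st.1 ++ ['_'], true) else st)
          ([], false)).1) "_"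
      = PySem.Str.join "_"
          (PySem.Str.split₀ (String.ofList ((PySem.Str.lower (PySem.Str.strip label)).toList.map
            (fun ch => if PySem.Chars.isalnum ch then ch else ' ')))) := by
  apply String.toList_inj.mp
  set cs := (PySem.Str.lower (PySem.Str.strip label)).toList with hcs
  rw [PySem.Str.toList_stripChars, PySem.Str.toList_join, PySem.Str.split₀_map_toList]
  have hA : ((cs.foldl
      (fun (st : List Char × Bool) ch =>
        if PySem.Chars.isalnum ch then (st.1 ++ [ch], false)
        else if st.2 = false then (st.1 ++ ['_'], true) else st)
      ([], false)).1 : List Char) = pvAout cs false := by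
    simpa using pv_foldA cs [] false
  simp only [String.toList_ofList]
  rw [hA]
  have hstrip : PySem.Chars.stripChars (pvAout cs false) "_".toList
      = pvRstrip (List.dropWhile pvU (pvAout cs false)) := rfl
  rw [hstrip, pv_drop_aout_false]
  have hB : PySem.Chars.split₀ (cs.map (fun ch => if PySem.Chars.isalnum ch then ch else ' '))
      = pvTgo cs [] := by
    simpa using pv_split_blank cs [] []
  rw [hB]
  simpa using (pv_main cs []).symm

-- ===== VERDICT (by name: the statement is the Claim_ definition above) =====
theorem label_key_py_spec : Claim_equal_label_key_py := by
  intro label _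
  unfold Spec_label_key_py label_key_py label_key_py_alt
  simp only []
  rw [pv_keys_eq label]
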